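-- pv_equiv track=rewrite | github.com/Batmaev/archeo | baseline_solution/solution.py | _tile_positions
-- ===== SOURCE A (Python) =====
-- from typing import Any, Dict, Iterable, List, Optional, Tuple
--
-- def _tile_positions(length: int, tile_size: int, step: int) -> List[int]:
--     if length <= tile_size:
--         return [0]
--     positions = [0]
--     while positions[-1] + tile_size < length:
--         next_pos = positions[-1] + step
--         if next_pos + tile_size >= length:
--             positions.append(max(length - tile_size, 0))
--             break
--         positions.append(next_pos)
--     return sorted(dict.fromkeys(max(0, p) for p in positions))
-- ===== SOURCE B (Python) =====
-- def _tile_positions(length, tile_size, step):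
--     if length <= tile_size:
--         return [0]
--     out = [length - tile_size]
--     k = (length - tile_size - 1) // step  # index of last interior stepped tile
--     while k > 0:
--         out.append(k * step)
--         k -= 1
--     out.append(0)
--     out.reverse()
--     return out
-- ===== Notes on version B (the rewrite author's own statement) =====
-- stated objective: alternative
-- what changed: Instead of A's forward accumulation (repeatedly adding step, testing coverage of the running last position, breaking, then max/dedup/sort), B computes the index of the last interior tile once by floor division, emits positions back-to-front by index-times-step multiplication counting the index down to zero, and reverses; the coverage test, break and the dedup/sort/max post-pass disappear.
import Mathlib
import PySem

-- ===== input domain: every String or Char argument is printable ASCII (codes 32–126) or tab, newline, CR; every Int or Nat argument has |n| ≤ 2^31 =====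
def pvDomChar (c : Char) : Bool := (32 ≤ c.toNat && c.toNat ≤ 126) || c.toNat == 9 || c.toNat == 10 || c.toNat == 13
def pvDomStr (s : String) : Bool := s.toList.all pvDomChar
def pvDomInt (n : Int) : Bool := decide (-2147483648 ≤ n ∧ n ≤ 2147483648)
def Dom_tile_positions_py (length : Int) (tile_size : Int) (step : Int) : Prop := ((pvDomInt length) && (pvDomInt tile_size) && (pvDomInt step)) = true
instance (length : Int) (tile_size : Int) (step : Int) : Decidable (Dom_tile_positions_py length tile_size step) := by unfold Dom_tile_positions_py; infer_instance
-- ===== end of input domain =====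

-- B replaces A's forward accumulation (coverage test on the running last position,
-- break, then max/dedup/sort) by: floor-division index of the last interior tile,
-- positions emitted back-to-front by index*step counting the index down, then a reverse.

-- ===== PORT A =====
-- A's while loop; `positions` is carried in REVERSE (head = Python's positions[-1]).
-- Fuel only makes the recursion total; with step ≥ 1 it is never exhausted.
def tileLoopA (length : Int) (tile_size : Int) (step : Int) : Nat → List Int → List Int
  | 0, positions => positions
  | Nat.succ fuel, positions =>
    if positions.headD 0 + tile_size < length then
      let next_pos := positions.headD 0 + step
      if next_pos + tile_size ≥ length then
        max (length - tile_size) 0 :: positions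
      else
        tileLoopA length tile_size step fuel (next_pos :: positions)
    else positions

def tile_positions_py (length : Int) (tile_size : Int) (step : Int) : List Int :=
  if length ≤ tile_size then [0]
  else
    let positions := tileLoopA length tile_size step ((length - tile_size).toNat + 1) [0]
    -- sorted(dict.fromkeys(max(0, p) for p in positions)); undo the reversed carry first
    PySem.List.sorted (PySem.List.dedup (positions.reverse.map (fun p => max 0 p))) (fun x => x) false

-- ===== PORT B =====
-- B's `while k > 0` countdown; the loop runs exactly k.toNat times (k decreases by 1),
-- so the Nat fuel is the exact trip count, not an approximation.
def tileLoopB (step : Int) : Nat → Int → List Int → List Int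
  | 0, _, out => out
  | Nat.succ n, k, out =>
    if 0 < k then tileLoopB step n (k - 1) (out ++ [k * step]) else out

def tile_positions_py_alt (length : Int) (tile_size : Int) (step : Int) : List Int :=
  if length ≤ tile_size then [0]
  else
    let k := PySem.Int.floordiv (length - tile_size - 1) step
    let out := tileLoopB step k.toNat k [length - tile_size]
    (out ++ [0]).reverse

-- ===== PRECONDITION & SPEC =====
-- Pre_ excludes only inputs on which A never returns: with length > tile_size and
-- step ≤ 0 the while loop runs forever (every appended position keeps the condition true).
def Pre_tile_positions_py (length : Int) (tile_size : Int) (step : Int) : Prop :=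
  length ≤ tile_size ∨ 1 ≤ step
instance (length : Int) (tile_size : Int) (step : Int) : Decidable (Pre_tile_positions_py length tile_size step) := by unfold Pre_tile_positions_py; infer_instance

def pvWitness_tile_positions_py : Int × Int × Int := (10, 3, 2)

def Spec_tile_positions_py (length : Int) (tile_size : Int) (step : Int) (out : List Int) : Prop := out = tile_positions_py_alt length tile_size step
instance (length : Int) (tile_size : Int) (step : Int) (out : List Int) : Decidable (Spec_tile_positions_py length tile_size step out) := by unfold Spec_tile_positions_py; infer_instance

-- ===== CLAIM (what is proved, stated in full; the proofs are below) =====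
def Claim_equal_tile_positions_py : Prop := ∀ (length : Int) (tile_size : Int) (step : Int), Dom_tile_positions_py length tile_size step → Pre_tile_positions_py length tile_size step → Spec_tile_positions_py length tile_size step (tile_positions_py length tile_size step)

-- ===== LEMMAS AND PROOFS =====

-- pyRange with positive step: empty past the bound, cons below it.
theorem pyRange_nil_of_pos (a b s : Int) (hs : 0 < s) (h : b ≤ a) :
    PySem.List.pyRange a b s = [] := by
  rw [PySem.List.pyRange_of_pos _ _ hs]
  simp [show ¬ a < b by omega]

theorem pyRange_cons_of_pos (a b s : Int) (hs : 0 < s) (h : a < b) :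
    PySem.List.pyRange a b s = a :: PySem.List.pyRange (a + s) b s := by
  rw [PySem.List.pyRange_of_pos _ _ hs, PySem.List.pyRange_of_pos _ _ hs]
  have hne : s ≠ 0 := by omega
  have hdiv : (b - a + s - 1) / s = (b - (a + s) + s - 1) / s + 1 := by
    have := Int.add_mul_ediv_right (b - (a + s) + s - 1) 1 hne
    simp only [one_mul] at this
    rw [← this]; ring_nf
  by_cases hab : a + s < b
  · have hpos : 0 ≤ (b - (a + s) + s - 1) / s := by
      apply Int.ediv_nonneg <;> omega
    simp only [if_pos h, if_pos hab, hdiv]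
    rw [show ((b - (a + s) + s - 1) / s + 1).toNat
        = ((b - (a + s) + s - 1) / s).toNat + 1 by omega]
    rw [List.range_succ_eq_map]
    simp only [List.map_cons, List.map_map]
    congr 1
    · simp
    · apply List.map_congr_left
      intro k _
      simp only [Function.comp]
      push_cast
      ring
  · -- exactly one element left
    have h1 : 1 ≤ b - a := by omega
    have h2 : b - a ≤ s := by omega
    have : (b - a + s - 1) / s = 1 := by
      have h0 : (b - a - 1) / s = 0 := Int.ediv_eq_zero_of_lt (by omega) (by omega)
      have hadd := Int.add_mul_ediv_right (b - a - 1) 1 hne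
      simp only [one_mul] at hadd
      rw [show b - a + s - 1 = b - a - 1 + s by ring, hadd, h0]
      omega
    simp [if_pos h, if_neg hab, this]

theorem mem_pyRange_pos_bounds {a b s x : Int} (hs : 0 < s)
    (hx : x ∈ PySem.List.pyRange a b s) : a ≤ x ∧ x < b := by
  have := (PySem.List.mem_pyRange_iff_of_pos hs x).mp hx
  exact ⟨this.1, this.2.1⟩

theorem pairwise_lt_pyRange_pos (a b s : Int) (hs : 0 < s) :
    (PySem.List.pyRange a b s).Pairwise (· < ·) := by
  rw [PySem.List.pyRange_of_pos _ _ hs]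
  apply List.Pairwise.map
  · intro k m hkm
    have : (k : Int) < m := by exact_mod_cast hkm
    nlinarith
  · exact List.pairwise_lt_range

-- The loop, started at position p (carried reversed), produces the clamped end
-- position in front of the reversed regular positions.
theorem tileLoopA_eq (l t s : Int) (hs : 1 ≤ s) :
    ∀ (fuel : Nat) (p : Int) (rest : List Int), p + t < l → (l - t - p).toNat ≤ fuel →
      tileLoopA l t s fuel (p :: rest)
        = max (l - t) 0 :: (PySem.List.pyRange p (l - t) s).reverse ++ rest := by
  intro fuel
  induction fuel with
  | zero => intro p rest hp hfuel; omega
  | succ n ih =>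
    intro p rest hp hfuel
    have hplt : p < l - t := by omega
    rw [tileLoopA]
    simp only [List.headD_cons, if_pos (show p + t < l from hp)]
    by_cases hnext : p + s + t ≥ l
    · rw [if_pos hnext]
      rw [pyRange_cons_of_pos _ _ _ (by omega) hplt,
          pyRange_nil_of_pos _ _ _ (by omega) (by omega)]
      simp
    · rw [if_neg hnext]
      rw [ih (p + s) (p :: rest) (by omega) (by omega)]
      rw [pyRange_cons_of_pos _ _ _ (by omega) hplt]
      simp

-- A's value in canonical form: the ascending stepped positions plus the clamped end.
theorem tile_positions_py_canon (l t s : Int) (hlt : t < l) (hs : 1 ≤ s) :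
    tile_positions_py l t s = PySem.List.pyRange 0 (l - t) s ++ [l - t] := by
  unfold tile_positions_py
  simp only [if_neg (show ¬ l ≤ t by omega)]
  rw [tileLoopA_eq l t s hs ((l - t).toNat + 1) 0 [] (by omega) (by omega)]
  have hmax : max (l - t) 0 = l - t := by omega
  rw [hmax]
  have hrev : (((l - t) :: (PySem.List.pyRange 0 (l - t) s).reverse ++ ([] : List Int)).reverse)
      = PySem.List.pyRange 0 (l - t) s ++ [l - t] := by simp
  rw [hrev]
  set ys := PySem.List.pyRange 0 (l - t) s ++ [l - t] with hys
  have hbounds : ∀ x ∈ PySem.List.pyRange 0 (l - t) s, 0 ≤ x ∧ x < l - t := by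
    intro x hx; exact mem_pyRange_pos_bounds (by omega) hx
  have hnonneg : ∀ x ∈ ys, 0 ≤ x := by
    intro x hx
    rcases List.mem_append.mp hx with h | h
    · exact (hbounds x h).1
    · simp at h; omega
  have hpw : ys.Pairwise (· < ·) := by
    rw [hys, List.pairwise_append]
    refine ⟨pairwise_lt_pyRange_pos _ _ _ (by omega), by simp, ?_⟩
    intro x hx y hy
    simp at hy; subst hy
    exact (hbounds x hx).2
  have hmap : ys.map (fun p => max 0 p) = ys := by
    conv_rhs => rw [← List.map_id ys]
    apply List.map_congr_left
    intro x hx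
    have := hnonneg x hx
    simp
    omega
  rw [hmap]
  have hdedup : PySem.List.dedup ys = ys := by
    rw [PySem.List.dedup_eq_ofList]
    exact PySem.Set.ofList_eq_self_of_nodup ys hpw.nodup
  rw [hdedup]
  exact PySem.List.sorted_eq_self_of_pairwise ys _ (hpw.imp (fun h => le_of_lt h))

-- B's countdown loop run with exact fuel: appends k*s, (k-1)*s, …, 1*s.
theorem tileLoopB_eq (s : Int) :
    ∀ (n : Nat) (out : List Int),
      tileLoopB s n (n : Int) out
        = out ++ ((List.range n).map (fun j : Nat => ((j : Int) + 1) * s)).reverse := by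
  intro n
  induction n with
  | zero => intro out; simp [tileLoopB]
  | succ m ih =>
    intro out
    rw [tileLoopB]
    rw [if_pos (by exact_mod_cast Nat.succ_pos m)]
    have hk : ((m + 1 : Nat) : Int) - 1 = (m : Int) := by push_cast; ring
    rw [hk, ih]
    simp [List.range_succ]

-- Reindexing: the ascending multiples 0,s,…,n*s are 0 followed by (j+1)*s for j < n.
theorem asc_desc (s : Int) (n : Nat) :
    (List.range (n+1)).map (fun j : Nat => s * (j:Int))
      = 0 :: ((List.range n).map (fun j : Nat => ((j:Int)+1) * s)) := by
  rw [List.range_succ_eq_map]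
  simp only [List.map_cons, Nat.cast_zero, mul_zero, List.map_map]
  congr 1
  apply List.map_congr_left
  intro x _
  simp [Function.comp]
  ring

-- B's value in the same canonical form.
theorem tile_positions_py_alt_canon (l t s : Int) (hlt : t < l) (hs : 1 ≤ s) :
    tile_positions_py_alt l t s = PySem.List.pyRange 0 (l - t) s ++ [l - t] := by
  unfold tile_positions_py_alt
  simp only [if_neg (show ¬ l ≤ t by omega)]
  rw [PySem.Int.floordiv_eq_ediv_of_pos (by omega)]
  set k : Int := (l - t - 1) / s with hkdef
  have hk0 : 0 ≤ k := Int.ediv_nonneg (by omega) (by omega)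
  have hcast : (k.toNat : Int) = k := Int.toNat_of_nonneg hk0
  rw [show tileLoopB s k.toNat k [l - t]
      = tileLoopB s k.toNat ((k.toNat : Int)) [l - t] by rw [hcast]]
  rw [tileLoopB_eq]
  -- the range description of pyRange 0 (l-t) s
  have hne : s ≠ 0 := by omega
  have hdiv : (l - t + s - 1) / s = k + 1 := by
    have := Int.add_mul_ediv_right (l - t - 1) 1 hne
    simp only [one_mul] at this
    rw [show l - t + s - 1 = l - t - 1 + s by ring, this, hkdef]
  have hrange : PySem.List.pyRange 0 (l - t) s
      = (List.range (k.toNat + 1)).map (fun j : Nat => s * (j : Int)) := by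
    rw [PySem.List.pyRange_of_pos _ _ (show (0:Int) < s by omega)]
    simp only [if_pos (show (0:Int) < l - t by omega), sub_zero, hdiv]
    rw [show (k + 1).toNat = k.toNat + 1 by omega]
    simp only [zero_add]
  rw [hrange, asc_desc]
  simp

-- ===== VERDICT (by name: the statement is the Claim_ definition above) =====
theorem tile_positions_py_spec : Claim_equal_tile_positions_py := by
  intro l t s _ hpre
  unfold Spec_tile_positions_py
  by_cases hle : l ≤ t
  · unfold tile_positions_py tile_positions_py_alt
    simp [hle]
  · have hs : 1 ≤ s := by
      cases hpre with
      | inl h => exact absurd h hle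
      | inr h => exact h
    rw [tile_positions_py_canon l t s (by omega) hs,
        tile_positions_py_alt_canon l t s (by omega) hs]
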